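-- pv_equiv track=rewrite | github.com/TheoDlmz/DBCOMSOC | pycomsoc/winners/pw.py | __aggregatePlurality
-- ===== SOURCE A (Python) =====
-- def __aggregatePlurality(rootsList,m):
--     dictRoots = dict()
--     tabRoots = []
--     countRoots = []
--     i = 0
--
--     for roots_i in rootsList:
--         if str(roots_i) in dictRoots.keys():
--             # Increment the number of voters with the same roots list
--             countRoots[dictRoots[str(roots_i)]] += 1
--         else:
--             # Add a new kind of voters
--             countRoots.append(1)
--             tabRoots.append(roots_i)
--             dictRoots[str(roots_i)] = i
--             i+=1
--
--     return tabRoots,countRoots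
-- ===== SOURCE B (Python) =====
-- def __aggregatePlurality(rootsList, m):
--     # Two separate passes: order-preserving dedup, then a counting pass.
--     tabRoots = []
--     for roots_i in rootsList:
--         if roots_i not in tabRoots:
--             tabRoots.append(roots_i)
--     countRoots = [rootsList.count(r) for r in tabRoots]
--     return tabRoots, countRoots
-- ===== Notes on version B (the rewrite author's own statement) =====
-- stated objective: simpler
-- what changed: Replaces A's single loop that maintains a str-keyed index dict plus parallel lists with in-place count increments by two independent passes: an order-preserving dedup producing the distinct roots lists, then a separate counting pass that computes each representative's multiplicity with list.count.
import Mathlib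
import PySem

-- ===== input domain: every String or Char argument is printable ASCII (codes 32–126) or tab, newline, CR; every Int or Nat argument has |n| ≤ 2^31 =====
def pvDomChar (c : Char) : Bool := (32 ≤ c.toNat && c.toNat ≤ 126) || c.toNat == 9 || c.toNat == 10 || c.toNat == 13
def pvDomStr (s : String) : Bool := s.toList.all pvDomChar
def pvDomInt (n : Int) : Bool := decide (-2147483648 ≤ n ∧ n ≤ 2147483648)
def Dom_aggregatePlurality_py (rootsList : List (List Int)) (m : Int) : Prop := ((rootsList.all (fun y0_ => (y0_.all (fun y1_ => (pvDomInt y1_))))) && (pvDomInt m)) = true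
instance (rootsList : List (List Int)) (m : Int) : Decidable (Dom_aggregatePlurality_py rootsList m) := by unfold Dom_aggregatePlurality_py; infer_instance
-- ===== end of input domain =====

-- B replaces A's dict-of-indices + in-place increments by two independent passes
-- (order-preserving dedup, then a counting pass); objective: simpler, not faster.

-- ===== PORT A =====
-- A keys dictRoots by str(roots_i); str is injective on Python lists of ints, so the Dict
-- is keyed by the list itself here — every lookup/containment behaves identically (exact).
def aggStepA (st : PySem.Dict (List Int) Int × List (List Int) × List Int × Int)
    (r : List Int) : PySem.Dict (List Int) Int × List (List Int) × List Int × Int :=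
  match st with
  | (d, tab, cnt, i) =>
    match d.get? r with
    | some idx =>
        -- countRoots[dictRoots[str(roots_i)]] += 1; idx is always a valid index of cnt
        -- (loop invariant), so the total forms pySetD/pyGetD are exact here
        (d, tab, PySem.List.pySetD cnt idx (PySem.List.pyGetD cnt idx 0 + 1), i)
    | none =>
        (d.insert r i, tab ++ [r], cnt ++ [1], i + 1)

def aggregatePlurality_py (rootsList : List (List Int)) (m : Int) : List (List Int) × List Int :=
  let st := rootsList.foldl aggStepA (PySem.Dict.empty, [], [], 0)
  (st.2.1, st.2.2.1)

-- ===== PORT B =====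
def aggregatePlurality_py_alt (rootsList : List (List Int)) (m : Int) : List (List Int) × List Int :=
  let tab := rootsList.foldl (fun acc r => if acc.contains r then acc else acc ++ [r]) []
  (tab, tab.map (fun r => (PySem.List.count rootsList r : Int)))

-- ===== PRECONDITION & SPEC =====
def Spec_aggregatePlurality_py (rootsList : List (List Int)) (m : Int) (out : List (List Int) × List Int) : Prop := out = aggregatePlurality_py_alt rootsList m
instance (rootsList : List (List Int)) (m : Int) (out : List (List Int) × List Int) : Decidable (Spec_aggregatePlurality_py rootsList m out) := by unfold Spec_aggregatePlurality_py; infer_instance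

-- ===== CLAIM (what is proved, stated in full; the proofs are below) =====
def Claim_equal_aggregatePlurality_py : Prop := ∀ (rootsList : List (List Int)) (m : Int), Dom_aggregatePlurality_py rootsList m → Spec_aggregatePlurality_py rootsList m (aggregatePlurality_py rootsList m)

-- ===== LEMMAS AND PROOFS =====

-- in-place increment at the index of r = recounting with one extra copy of r appended
theorem map_count_set (tab p : List (List Int)) (r : List Int) (k : Nat)
    (hnd : tab.Nodup) (hidx : PySem.List.index? tab r = some k) :
    tab.map (fun r' => (List.count r' (p ++ [r]) : Int)) =
      (tab.map (fun r' => (List.count r' p : Int))).set k ((List.count r p : Int) + 1) := by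
  obtain ⟨hk, hkr, -⟩ := PySem.List.getElem_of_index?_eq_some hidx
  apply List.ext_getElem
  · simp
  · intro j h1 h2
    simp only [List.getElem_map] at *
    rw [List.getElem_set]
    by_cases hjk : k = j
    · subst hjk
      simp [hkr, List.count_append]
    · have hlen : j < tab.length := by simpa using h1
      have : tab[j] ≠ r := by
        intro hc
        exact hjk (hnd.getElem_inj_iff.mp (by rw [hkr, hc]) ).symm
      simp [List.count_append, hjk, Ne.symm this]

-- main loop invariant for A's fold
theorem aggA_loop (s : List (List Int)) : ∀ (p : List (List Int)) (d : PySem.Dict (List Int) Int),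
    (∀ r, d.get? r = (PySem.List.index? (PySem.Set.ofList p) r).map Int.ofNat) →
    (s.foldl aggStepA (d, PySem.Set.ofList p,
        (PySem.Set.ofList p).map (fun r => (List.count r p : Int)),
        ((PySem.Set.ofList p).length : Int))).2 =
      (PySem.Set.ofList (p ++ s),
        (PySem.Set.ofList (p ++ s)).map (fun r => (List.count r (p ++ s) : Int)),
        ((PySem.Set.ofList (p ++ s)).length : Int)) := by
  induction s with
  | nil => intro p d _; simp
  | cons r s ih =>
    intro p d hd
    have hstep : aggStepA (d, PySem.Set.ofList p,
        (PySem.Set.ofList p).map (fun r => (List.count r p : Int)),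
        ((PySem.Set.ofList p).length : Int)) r
        = (if r ∈ PySem.Set.ofList p then d else d.insert r ((PySem.Set.ofList p).length : Int),
           PySem.Set.ofList (p ++ [r]),
           (PySem.Set.ofList (p ++ [r])).map (fun r' => (List.count r' (p ++ [r]) : Int)),
           ((PySem.Set.ofList (p ++ [r])).length : Int)) := by
      by_cases hmem : r ∈ PySem.Set.ofList p
      · obtain ⟨k, hk⟩ := Option.isSome_iff_exists.mp
          ((PySem.List.index?_isSome_iff (xs := PySem.Set.ofList p) (v := r)).mpr hmem)
        have hof : PySem.Set.ofList (p ++ [r]) = PySem.Set.ofList p := by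
          rw [PySem.Set.ofList_append_singleton, PySem.Set.add_of_mem hmem]
        simp only [aggStepA, hd r, hk, Option.map_some, hof,
          hmem, if_pos, Prod.mk.injEq]
        refine ⟨trivial, trivial, ?_, trivial⟩
        have hklt : k < (PySem.Set.ofList p).length := by
          obtain ⟨h, -, -⟩ := PySem.List.getElem_of_index?_eq_some hk
          exact h
        obtain ⟨hklt', hkr, -⟩ := PySem.List.getElem_of_index?_eq_some hk
        rw [map_count_set _ p r k (PySem.Set.nodup_ofList p) hk]
        simp only [Int.ofNat_eq_natCast]
        rw [PySem.List.pySetD_natCast]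
        congr 1
        rw [PySem.List.pyGetD_natCast]
        simp [List.getD_eq_getElem?_getD, hklt', hkr]
      · have hnotp : r ∉ p := fun h => hmem ((PySem.Set.mem_ofList _ _).mpr h)
        have hof : PySem.Set.ofList (p ++ [r]) = PySem.Set.ofList p ++ [r] := by
          rw [PySem.Set.ofList_append_singleton, PySem.Set.add_of_not_mem hmem]
        have hidx : PySem.List.index? (PySem.Set.ofList p) r = none :=
          (PySem.List.index?_eq_none_iff _ _).mpr hmem
        simp only [aggStepA, hd r, hidx, Option.map_none, hof,
          hmem, if_neg, not_false_iff, Prod.mk.injEq]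
        refine ⟨trivial, trivial, ?_, by simp [List.length_append]⟩
        rw [List.map_append]
        congr 1
        · apply List.map_congr_left
          intro x hx
          have hxp : x ∈ p := (PySem.Set.mem_ofList _ _).mp hx
          have : x ≠ r := fun hc => hnotp (hc ▸ hxp)
          simp [List.count_append, Ne.symm this]
        · simp [List.count_append, List.count_eq_zero_of_not_mem hnotp]
    rw [List.foldl_cons, hstep]
    have hd' : ∀ r', (if r ∈ PySem.Set.ofList p then d
          else d.insert r ((PySem.Set.ofList p).length : Int)).get? r'
        = (PySem.List.index? (PySem.Set.ofList (p ++ [r])) r').map Int.ofNat := by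
      intro r'
      by_cases hmem : r ∈ PySem.Set.ofList p
      · rw [if_pos hmem, hd r']
        congr 1
        rw [PySem.Set.ofList_append_singleton, PySem.Set.add_of_mem hmem]
      · rw [if_neg hmem]
        have hof : PySem.Set.ofList (p ++ [r]) = PySem.Set.ofList p ++ [r] := by
          rw [PySem.Set.ofList_append_singleton, PySem.Set.add_of_not_mem hmem]
        rw [hof]
        by_cases hrr : r' = r
        · subst hrr
          rw [PySem.Dict.get?_insert_self, PySem.List.index?_append_singleton_self _ _ hmem]
          simp
        · rw [PySem.Dict.get?_insert_of_ne _ _ hrr, hd r']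
          by_cases hr'mem : r' ∈ PySem.Set.ofList p
          · rw [PySem.List.index?_append_of_mem _ hr'mem]
          · rw [(PySem.List.index?_eq_none_iff _ _).mpr hr'mem,
              (PySem.List.index?_eq_none_iff _ _).mpr (by
                simp only [List.mem_append, List.mem_singleton]
                rintro (h | h); exact hr'mem h; exact hrr h)]
    have := ih (p ++ [r])
        (if r ∈ PySem.Set.ofList p then d else d.insert r ((PySem.Set.ofList p).length : Int)) hd'
    rw [this]
    simp

-- ===== VERDICT (by name: the statement is the Claim_ definition above) =====
theorem aggregatePlurality_py_spec : Claim_equal_aggregatePlurality_py := by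
  unfold Claim_equal_aggregatePlurality_py
  intro rootsList m _
  unfold Spec_aggregatePlurality_py aggregatePlurality_py aggregatePlurality_py_alt
  have h0 : ∀ r : List Int, (PySem.Dict.empty : PySem.Dict (List Int) Int).get? r
      = (PySem.List.index? (PySem.Set.ofList ([] : List (List Int))) r).map Int.ofNat := by
    intro r; simp [PySem.Dict.get?_empty, PySem.Set.ofList]
  have hmain := aggA_loop rootsList [] PySem.Dict.empty h0
  simp only [List.nil_append] at hmain
  have hfold : rootsList.foldl (fun acc r => if acc.contains r then acc else acc ++ [r]) []
      = PySem.Set.ofList rootsList := by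
    rw [PySem.Set.ofList_eq_foldl]
    rfl
  simp only [hfold]
  have hA : rootsList.foldl aggStepA (PySem.Dict.empty, [], [], 0)
      = rootsList.foldl aggStepA (PySem.Dict.empty, PySem.Set.ofList ([] : List (List Int)),
          (PySem.Set.ofList ([] : List (List Int))).map (fun r => (List.count r [] : Int)),
          ((PySem.Set.ofList ([] : List (List Int))).length : Int)) := by rfl
  rw [hA]
  rw [show (rootsList.foldl aggStepA _).2.1 = ((rootsList.foldl aggStepA (PySem.Dict.empty, PySem.Set.ofList ([] : List (List Int)),
          (PySem.Set.ofList ([] : List (List Int))).map (fun r => (List.count r [] : Int)),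
          ((PySem.Set.ofList ([] : List (List Int))).length : Int))).2).1 from rfl]
  rw [hmain]
  simp [PySem.List.count_eq]
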